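-- pv_equiv track=rewrite | github.com/mbchl-code/Words | game/words_checking.py | points_in_step
-- ===== SOURCE A (Python) =====
-- def points_in_step(user_word: str, base_word: str) -> int:
--     '''
--     user_word: str: слово пользователя
--     base_word: str: исходное слово
--     Возвращает количество баллов за один ввод слова
--     Если слово пользователя использовано повторно, функция вызываться не должна
--     '''
--     points = 0
--     base_word = list(base_word)
--     for letter in user_word:
--         if letter not in base_word:
--             points -= 1
--         else:
--             base_word.remove(letter)
--
--     if points == 0:
--         points = len(user_word)
--     return points
-- ===== SOURCE B (Python) =====
-- def points_in_step(user_word: str, base_word: str) -> int: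
--     # Frequency tables of both words, then one bulk multiset-surplus computation:
--     # no per-letter membership scan or removal from a shrinking list.
--     cu = {}
--     for ch in user_word:
--         cu[ch] = cu.get(ch, 0) + 1
--     cb = {}
--     for ch in base_word:
--         cb[ch] = cb.get(ch, 0) + 1
--     unmatched = 0
--     for ch, n in cu.items():
--         if n > cb.get(ch, 0):
--             unmatched += n - cb.get(ch, 0)
--     return len(user_word) if unmatched == 0 else -unmatched
-- ===== Notes on version B (the rewrite author's own statement) =====
-- stated objective: faster
-- what changed: Replaces A's per-letter scan over a shrinking copy of base_word (membership test plus list.remove, each O(len(base))) with two frequency tables built in one pass each and a single bulk multiset-surplus sum over the distinct user letters.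
import Mathlib
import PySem

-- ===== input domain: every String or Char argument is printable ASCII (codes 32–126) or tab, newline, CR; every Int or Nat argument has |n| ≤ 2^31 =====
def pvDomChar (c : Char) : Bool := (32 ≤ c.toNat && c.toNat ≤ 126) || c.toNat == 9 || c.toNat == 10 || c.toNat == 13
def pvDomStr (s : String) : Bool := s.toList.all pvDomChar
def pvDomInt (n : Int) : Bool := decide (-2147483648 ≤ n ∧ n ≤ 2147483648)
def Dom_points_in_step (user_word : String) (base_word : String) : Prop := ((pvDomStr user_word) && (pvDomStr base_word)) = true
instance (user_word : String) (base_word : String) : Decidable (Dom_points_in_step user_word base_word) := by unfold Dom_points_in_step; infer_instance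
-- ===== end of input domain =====

-- B replaces A's per-letter scan/remove over a shrinking copy of base_word with two
-- frequency tables and one bulk multiset-surplus sum (objective: faster, O(n+m) vs O(n·m)).

-- ===== PORT A =====
-- A: points = 0; base = list(base_word); for letter in user_word: not-in → points -= 1,
-- else base.remove(letter); then if points == 0: points = len(user_word).
def points_in_step (user_word : String) (base_word : String) : Int :=
  let st := user_word.toList.foldl
    (fun (st : Int × List Char) letter =>
      if !(st.2.contains letter) then (st.1 - 1, st.2)
      else (st.1, (PySem.List.remove? st.2 letter).getD st.2))  -- remove never fails: membership just checked
    (0, base_word.toList)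
  if st.1 = 0 then PySem.Str.len user_word else st.1

-- ===== PORT B =====
-- B: counts of user_word and base_word, then sum of positive surpluses over user's distinct letters.
def points_in_step_alt (user_word : String) (base_word : String) : Int :=
  let cu := user_word.toList.foldl (fun d ch => d.insert ch (d.getD ch 0 + 1)) PySem.Dict.empty
  let cb := base_word.toList.foldl (fun d ch => d.insert ch (d.getD ch 0 + 1)) PySem.Dict.empty
  let unmatched := cu.items.foldl
    (fun (acc : Int) p =>
      if cb.getD p.1 0 < p.2 then acc + (p.2 - cb.getD p.1 0) else acc) 0
  if unmatched = 0 then PySem.Str.len user_word else -unmatched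

-- ===== PRECONDITION & SPEC =====
def Spec_points_in_step (user_word : String) (base_word : String) (out : Int) : Prop := out = points_in_step_alt user_word base_word
instance (user_word : String) (base_word : String) (out : Int) : Decidable (Spec_points_in_step user_word base_word out) := by unfold Spec_points_in_step; infer_instance

-- ===== CLAIM (what is proved, stated in full; the proofs are below) =====
def Claim_equal_points_in_step : Prop := ∀ (user_word : String) (base_word : String), Dom_points_in_step user_word base_word → Spec_points_in_step user_word base_word (points_in_step user_word base_word)

-- ===== LEMMAS AND PROOFS =====

-- number of letters of `l` left unmatched by A's sequential scan-and-remove against `b`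
def pvN : List Char → List Char → Int
  | [], _ => 0
  | c :: l, b => if c ∈ b then pvN l (b.erase c) else pvN l b + 1

theorem pvA_fold (l : List Char) : ∀ (p : Int) (b : List Char),
    (l.foldl (fun (st : Int × List Char) letter =>
      if !(st.2.contains letter) then (st.1 - 1, st.2)
      else (st.1, (PySem.List.remove? st.2 letter).getD st.2)) (p, b)).1 = p - pvN l b := by
  induction l with
  | nil => intro p b; simp [pvN]
  | cons c l ih =>
    intro p b
    by_cases h : c ∈ b
    · simp only [List.foldl_cons, pvN, h, List.contains_iff_mem.2 h,
        Bool.not_true, Bool.false_eq_true, if_false, if_true,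
        PySem.List.remove?_eq_some_erase b c h, Option.getD_some]
      rw [ih]
    · have hc : b.contains c = false := by
        simp [h]
      simp only [List.foldl_cons, pvN, if_neg h, hc, Bool.not_false, if_true]
      rw [ih]; ring

theorem pvB_fold (l : List (Char × Int)) (g : Char → Int) : ∀ (acc : Int),
    (l.foldl (fun (acc : Int) p =>
      if g p.1 < p.2 then acc + (p.2 - g p.1) else acc) acc)
    = acc + (l.map (fun p => max 0 (p.2 - g p.1))).sum := by
  induction l with
  | nil => intro acc; simp
  | cons q l ih =>
    intro acc
    simp only [List.foldl_cons, List.map_cons, List.sum_cons, ih]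
    have : (if g q.1 < q.2 then acc + (q.2 - g q.1) else acc)
        = acc + max 0 (q.2 - g q.1) := by
      split_ifs with h <;> omega
    rw [this]; ring

-- the sequential unmatched count is the multiset surplus
theorem pvN_eq_sum (l : List Char) : ∀ (b : List Char),
    pvN l b = ∑ x ∈ l.toFinset, max 0 ((l.count x : Int) - (b.count x : Int)) := by
  induction l with
  | nil => intro b; simp [pvN]
  | cons c l ih =>
    intro b
    rw [List.toFinset_cons]
    by_cases h : c ∈ b
    · have hb1 : 1 ≤ b.count c := List.count_pos_iff.2 h
      rw [pvN, if_pos h, ih]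
      have hext : ∑ x ∈ l.toFinset, max 0 ((l.count x : Int) - ((b.erase c).count x : Int))
          = ∑ x ∈ insert c l.toFinset, max 0 ((l.count x : Int) - ((b.erase c).count x : Int)) := by
        rw [Finset.sum_insert_of_eq_zero_if_notMem]
        intro hcl
        have h0 : l.count c = 0 := List.count_eq_zero.2 (by simpa using hcl)
        have he : (b.erase c).count c = b.count c - 1 := by
          simp
        rw [h0, he]
        have : ((b.count c - 1 : Nat) : Int) = (b.count c : Int) - 1 := by
          omega
        rw [this]
        omega
      rw [hext]
      apply Finset.sum_congr rfl
      intro x _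
      by_cases hx : x = c
      · subst hx
        have he : (b.erase x).count x = b.count x - 1 := by simp
        rw [he, List.count_cons_self]
        have h1 : ((b.count x - 1 : Nat) : Int) = (b.count x : Int) - 1 := by omega
        have h2 : ((l.count x + 1 : Nat) : Int) = (l.count x : Int) + 1 := by omega
        rw [h1, h2]
        congr 1; ring
      · rw [List.count_erase_of_ne hx, List.count_cons_of_ne (Ne.symm hx)]
    · have hb0 : b.count c = 0 := List.count_eq_zero.2 h
      rw [pvN, if_neg h, ih]
      have hsplit : ∀ x ∈ insert c l.toFinset,
          max 0 (((c :: l).count x : Int) - (b.count x : Int))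
          = max 0 ((l.count x : Int) - (b.count x : Int)) + (if x = c then 1 else 0) := by
        intro x _
        by_cases hx : x = c
        · subst hx
          rw [List.count_cons_self, hb0, if_pos rfl]
          have h2 : ((l.count x + 1 : Nat) : Int) = (l.count x : Int) + 1 := by omega
          rw [h2]
          omega
        · rw [List.count_cons_of_ne (Ne.symm hx), if_neg hx, add_zero]
      rw [Finset.sum_congr rfl hsplit, Finset.sum_add_distrib,
        Finset.sum_ite_eq' (insert c l.toFinset) c (fun _ => (1 : Int)),
        if_pos (Finset.mem_insert_self c l.toFinset),
        Finset.sum_insert_of_eq_zero_if_notMem]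
      intro hcl
      have h0 : l.count c = 0 := List.count_eq_zero.2 (by simpa using hcl)
      rw [h0, hb0]
      simp

-- B's unmatched value equals pvN
theorem pvB_unmatched (u b : List Char) :
    ((PySem.Dict.counter u).items.foldl
      (fun (acc : Int) p =>
        if (PySem.Dict.counter b).getD p.1 0 < p.2 then acc + (p.2 - (PySem.Dict.counter b).getD p.1 0) else acc) 0) = pvN u b := by
  rw [pvB_fold _ (fun k => (PySem.Dict.counter b).getD k 0) 0, zero_add, PySem.Dict.items_counter, List.map_map, pvN_eq_sum]
  have hfin : ((PySem.Set.ofList u : List Char).toFinset : Finset Char) = u.toFinset := by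
    apply Finset.ext
    intro x
    simp [List.mem_toFinset, PySem.Set.mem_ofList]
  rw [← hfin, List.sum_toFinset _ (PySem.Set.nodup_ofList u)]
  apply congrArg
  apply List.map_congr_left
  intro x _
  simp [PySem.Dict.getD_counter]

-- ===== VERDICT (by name: the statement is the Claim_ definition above) =====
theorem points_in_step_spec : Claim_equal_points_in_step := by
  intro u b _
  unfold Spec_points_in_step points_in_step points_in_step_alt
  rw [PySem.Dict.foldl_insert_getD_add_one_eq_counter,
    PySem.Dict.foldl_insert_getD_add_one_eq_counter]
  simp only [pvA_fold, pvB_unmatched, zero_sub]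
  by_cases h : pvN u.toList b.toList = 0
  · simp [h]
  · simp [h, neg_eq_zero]
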